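-- pv_equiv track=rewrite | github.com/Marigiaco/reposit-rio-Mariana-e-Joana | funcoes.py | calcula_pontos_sequencia_baixa
-- ===== SOURCE A (Python) =====
-- def calcula_pontos_sequencia_baixa (l):
--     m = []
--     i = 1
--     while i<=3:
--         if i in l and i+1 in l and i+2 in l and i+3 in l:
--             return 15
--         i = i+1
--     return 0
-- ===== SOURCE B (Python) =====
-- def calcula_pontos_sequencia_baixa(l):
--     s = set(l)
--     run = 0
--     for v in range(1, 7):
--         run = run + 1 if v in s else 0
--         if run == 4:
--             return 15
--     return 0
-- ===== Notes on version B (the rewrite author's own statement) =====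
-- stated objective: alternative
-- what changed: Replaces A's three independent four-term membership-window conjunctions (while i<=3 testing i..i+3 in l) with a single streak-counting pass over 1..6 against a presence set, returning 15 as soon as a run of 4 consecutive present values is found.
import Mathlib
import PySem

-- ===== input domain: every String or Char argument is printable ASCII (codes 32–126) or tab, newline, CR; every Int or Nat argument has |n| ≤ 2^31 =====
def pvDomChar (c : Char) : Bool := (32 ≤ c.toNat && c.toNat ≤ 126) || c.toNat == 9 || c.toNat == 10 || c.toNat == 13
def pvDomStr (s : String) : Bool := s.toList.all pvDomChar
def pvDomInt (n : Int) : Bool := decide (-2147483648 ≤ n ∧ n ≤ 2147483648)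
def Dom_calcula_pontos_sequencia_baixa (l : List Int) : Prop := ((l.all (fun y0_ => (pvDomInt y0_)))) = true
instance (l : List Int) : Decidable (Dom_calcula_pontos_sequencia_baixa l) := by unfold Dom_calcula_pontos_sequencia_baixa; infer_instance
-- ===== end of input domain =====

-- B replaces A's three fixed four-term membership windows with one streak-counting
-- pass over 1..6 against a presence set (a different decomposition, same cost).

-- ===== PORT A =====
-- while i<=3: if i in l and i+1 in l and i+2 in l and i+3 in l: return 15; i = i+1
def pvALoop (l : List Int) (i : Int) : Int :=
  if _h : i ≤ 3 then
    if l.contains i && l.contains (i+1) && l.contains (i+2) && l.contains (i+3) then 15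
    else pvALoop l (i+1)
  else 0
termination_by (4 - i).toNat
decreasing_by omega

def calcula_pontos_sequencia_baixa (l : List Int) : Int :=
  pvALoop l 1

-- ===== PORT B =====
-- for v in range(1,7): run = run+1 if v in s else 0; if run == 4: return 15 — else 0
def pvBLoop (s : PySem.Set Int) : List Int → Int → Int
  | [], _ => 0
  | v :: vs, run =>
    let run' := if PySem.Set.contains s v then run + 1 else 0
    if run' == 4 then 15 else pvBLoop s vs run'

def calcula_pontos_sequencia_baixa_alt (l : List Int) : Int :=
  pvBLoop (PySem.Set.ofList l) (PySem.List.pyRange 1 7 1) 0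

-- ===== PRECONDITION & SPEC =====
def Spec_calcula_pontos_sequencia_baixa (l : List Int) (out : Int) : Prop := out = calcula_pontos_sequencia_baixa_alt l
instance (l : List Int) (out : Int) : Decidable (Spec_calcula_pontos_sequencia_baixa l out) := by unfold Spec_calcula_pontos_sequencia_baixa; infer_instance

-- ===== CLAIM (what is proved, stated in full; the proofs are below) =====
def Claim_equal_calcula_pontos_sequencia_baixa : Prop := ∀ (l : List Int), Dom_calcula_pontos_sequencia_baixa l → Spec_calcula_pontos_sequencia_baixa l (calcula_pontos_sequencia_baixa l)

-- ===== LEMMAS AND PROOFS =====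

theorem contains_ofList (l : List Int) (v : Int) :
    PySem.Set.contains (PySem.Set.ofList l) v = l.contains v := by
  simp [PySem.Set.contains_iff, PySem.Set.mem_ofList, List.contains_iff_mem]

-- ===== VERDICT (by name: the statement is the Claim_ definition above) =====
theorem calcula_pontos_sequencia_baixa_spec : Claim_equal_calcula_pontos_sequencia_baixa := by
  intro l _
  unfold Spec_calcula_pontos_sequencia_baixa
  unfold calcula_pontos_sequencia_baixa calcula_pontos_sequencia_baixa_alt
  have hr : PySem.List.pyRange 1 7 1 = [1, 2, 3, 4, 5, 6] := by decide
  rw [hr]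
  by_cases h1 : (1:Int) ∈ l <;> by_cases h2 : (2:Int) ∈ l <;>
  by_cases h3 : (3:Int) ∈ l <;> by_cases h4 : (4:Int) ∈ l <;>
  by_cases h5 : (5:Int) ∈ l <;> by_cases h6 : (6:Int) ∈ l <;>
  simp [pvALoop, pvBLoop, contains_ofList,
    h1, h2, h3, h4, h5, h6]
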